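-- pv_equiv track=rewrite | github.com/gabrielemongirdaite/advent_of_code_2022 | day18.py | check_z
-- ===== SOURCE A (Python) =====
-- def check_z(cube, all_cubes, min_z, max_z):
--     x = cube[0]
--     y = cube[1]
--     z = cube[2]
--     answer = []
--     for i in range(z, max_z + 1):
--         if [x, y, i] in all_cubes:
--             answer.append([x, y, i])
--             break
--     for i in range(z, min_z - 1, -1):
--         if [x, y, i] in all_cubes:
--             answer.append([x, y, i])
--             break
--     return len(answer), answer
-- ===== SOURCE B (Python) =====
-- def check_z(cube, all_cubes, min_z, max_z):
--     x = cube[0]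
--     y = cube[1]
--     z = cube[2]
--     zs = [c[2] for c in all_cubes if len(c) == 3 and c[0] == x and c[1] == y]
--     answer = []
--     up = [t for t in zs if z <= t <= max_z]
--     if up:
--         answer.append([x, y, min(up)])
--     down = [t for t in zs if min_z <= t <= z]
--     if down:
--         answer.append([x, y, max(down)])
--     return len(answer), answer
-- ===== Notes on version B (the rewrite author's own statement) =====
-- stated objective: faster
-- what changed: Instead of scanning every integer z-coordinate between z and max_z (and down to min_z) with a list-membership test per step, B makes one pass over all_cubes collecting the z-values of cubes in the same (x,y) column and takes the min/max of those within range, so the z-range is never iterated.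
import Mathlib
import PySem

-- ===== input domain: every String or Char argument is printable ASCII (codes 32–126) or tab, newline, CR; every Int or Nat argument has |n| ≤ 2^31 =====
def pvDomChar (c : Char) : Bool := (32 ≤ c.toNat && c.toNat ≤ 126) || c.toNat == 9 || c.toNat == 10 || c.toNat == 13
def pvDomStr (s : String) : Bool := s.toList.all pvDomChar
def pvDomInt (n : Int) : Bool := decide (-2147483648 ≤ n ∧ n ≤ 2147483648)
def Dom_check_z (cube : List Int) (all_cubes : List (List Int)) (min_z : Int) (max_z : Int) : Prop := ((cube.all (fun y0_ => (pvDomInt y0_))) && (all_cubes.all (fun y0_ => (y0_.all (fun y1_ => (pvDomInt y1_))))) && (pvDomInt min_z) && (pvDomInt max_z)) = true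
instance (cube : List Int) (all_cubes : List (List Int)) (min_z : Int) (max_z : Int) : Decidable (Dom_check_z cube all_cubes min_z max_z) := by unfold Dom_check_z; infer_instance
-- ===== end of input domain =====

-- B replaces A's scan of every integer between z and max_z/min_z (a membership test per step)
-- by a single pass over all_cubes collecting the z-values of the (x,y) column and taking min/max.

-- ===== PORT A =====
-- first i in the range list with [x,y,i] ∈ all_cubes (the loop with break)
def pvFirstHit (x y : Int) (all_cubes : List (List Int)) : List Int → Option Int
  | [] => none
  | i :: rest => if [x, y, i] ∈ all_cubes then some i else pvFirstHit x y all_cubes rest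

def check_z (cube : List Int) (all_cubes : List (List Int)) (min_z : Int) (max_z : Int) : Int × List (List Int) :=
  match PySem.List.pyGet? cube 0, PySem.List.pyGet? cube 1, PySem.List.pyGet? cube 2 with
  | some x, some y, some z =>
    let a1 : List (List Int) :=
      match pvFirstHit x y all_cubes (PySem.List.pyRange z (max_z + 1) 1) with
      | some i => [[x, y, i]]
      | none => []
    let answer : List (List Int) :=
      a1 ++ (match pvFirstHit x y all_cubes (PySem.List.pyRange z (min_z - 1) (-1)) with
             | some i => [[x, y, i]]
             | none => [])
    ((answer.length : Int), answer)
  | _, _, _ => (0, [])   -- IndexError: excluded by Pre_check_z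

-- ===== PORT B =====
def check_z_alt (cube : List Int) (all_cubes : List (List Int)) (min_z : Int) (max_z : Int) : Int × List (List Int) :=
  match cube with
  | x :: y :: z :: _ =>
    let zs : List Int := all_cubes.filterMap (fun c =>
      match c with
      | [a, b, t] => if a = x ∧ b = y then some t else none
      | _ => none)
    let up := zs.filter (fun t => decide (z ≤ t ∧ t ≤ max_z))
    let a1 : List (List Int) :=
      match PySem.List.min? up (fun t => t) with
      | some m => [[x, y, m]]
      | none => []
    let down := zs.filter (fun t => decide (min_z ≤ t ∧ t ≤ z))
    let a2 : List (List Int) :=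
      match PySem.List.max? down (fun t => t) with
      | some m => [[x, y, m]]
      | none => []
    let answer := a1 ++ a2
    ((answer.length : Int), answer)
  | _ => (0, [])   -- cube[0]/cube[1]/cube[2] IndexError: excluded by Pre_check_z

-- ===== PRECONDITION & SPEC =====
-- Pre_: A raises IndexError (cube[2]) when cube has fewer than 3 elements; B raises there too.
def Pre_check_z (cube : List Int) (all_cubes : List (List Int)) (min_z : Int) (max_z : Int) : Prop := 3 ≤ cube.length
instance (cube : List Int) (all_cubes : List (List Int)) (min_z : Int) (max_z : Int) : Decidable (Pre_check_z cube all_cubes min_z max_z) := by unfold Pre_check_z; infer_instance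
def pvWitness_check_z : List Int × List (List Int) × Int × Int := ([1, 2, 3], [[1, 2, 5], [1, 2, 1]], 0, 9)

def Spec_check_z (cube : List Int) (all_cubes : List (List Int)) (min_z : Int) (max_z : Int) (out : Int × List (List Int)) : Prop := out = check_z_alt cube all_cubes min_z max_z
instance (cube : List Int) (all_cubes : List (List Int)) (min_z : Int) (max_z : Int) (out : Int × List (List Int)) : Decidable (Spec_check_z cube all_cubes min_z max_z out) := by unfold Spec_check_z; infer_instance

-- ===== CLAIM (what is proved, stated in full; the proofs are below) =====
def Claim_equal_check_z : Prop := ∀ (cube : List Int) (all_cubes : List (List Int)) (min_z : Int) (max_z : Int), Dom_check_z cube all_cubes min_z max_z → Pre_check_z cube all_cubes min_z max_z → Spec_check_z cube all_cubes min_z max_z (check_z cube all_cubes min_z max_z)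

-- ===== LEMMAS AND PROOFS =====

-- membership in the column list zs is exactly membership of [x,y,t] in all_cubes
theorem pv_mem_zs (x y t : Int) (all_cubes : List (List Int)) :
    t ∈ all_cubes.filterMap (fun c =>
      match c with
      | [a, b, t] => if a = x ∧ b = y then some t else none
      | _ => none) ↔ [x, y, t] ∈ all_cubes := by
  rw [List.mem_filterMap]
  constructor
  · rintro ⟨c, hc, hmatch⟩
    match c with
    | [] => simp at hmatch
    | [a] => simp at hmatch
    | [a, b] => simp at hmatch
    | a :: b :: u :: d :: rest => simp at hmatch
    | [a, b, u] =>
      simp only at hmatch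
      split at hmatch
      · rename_i h
        obtain ⟨rfl, rfl⟩ := h
        cases hmatch; simpa using hc
      · cases hmatch
  · intro h
    exact ⟨[x, y, t], h, by simp⟩

-- upward scan: first hit of the ascending range = min of the in-range column values
theorem pv_up (x y : Int) (all_cubes : List (List Int)) (zs : List Int)
    (hz : ∀ t : Int, t ∈ zs ↔ [x, y, t] ∈ all_cubes) :
    ∀ (n : ℕ) (a b : Int), (b - a).toNat = n →
    pvFirstHit x y all_cubes (PySem.List.pyRange a b 1) =
      PySem.List.min? (zs.filter (fun t => decide (a ≤ t ∧ t < b))) (fun t => t) := by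
  intro n
  induction n with
  | zero =>
    intro a b hn
    have hba : b ≤ a := by omega
    rw [PySem.List.pyRange_one_eq_nil hba]
    have : zs.filter (fun t => decide (a ≤ t ∧ t < b)) = [] := by
      apply List.filter_eq_nil_iff.mpr
      intro t _; simp; omega
    rw [this]
    simp [pvFirstHit, PySem.List.min?]
  | succ m ih =>
    intro a b hn
    have hab : a < b := by omega
    rw [PySem.List.pyRange_one_cons hab]
    simp only [pvFirstHit]
    by_cases hmem : [x, y, a] ∈ all_cubes
    · rw [if_pos hmem]
      -- a is in the filtered list and is its minimum value
      have ha : a ∈ zs.filter (fun t => decide (a ≤ t ∧ t < b)) := by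
        rw [List.mem_filter]
        exact ⟨(hz a).2 hmem, by simp; omega⟩
      have hne : zs.filter (fun t => decide (a ≤ t ∧ t < b)) ≠ [] := by
        intro h; rw [h] at ha; cases ha
      cases hm' : PySem.List.min? (zs.filter (fun t => decide (a ≤ t ∧ t < b))) (fun t => t) with
      | none => exact absurd ((PySem.List.min?_eq_none_iff _ _).mp hm') hne
      | some m' => ?_
      have hmin := PySem.List.min?_isMin hm' a ha
      have hmem' := PySem.List.min?_mem hm'
      rw [List.mem_filter] at hmem'
      have : a ≤ m' := by have := hmem'.2; simp at this; omega
      congr 1; omega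
    · rw [if_neg hmem]
      have heq : zs.filter (fun t => decide (a ≤ t ∧ t < b)) =
          zs.filter (fun t => decide (a + 1 ≤ t ∧ t < b)) := by
        apply List.filter_congr
        intro t ht
        have hta : t ≠ a := by rintro rfl; exact hmem ((hz t).1 ht)
        simp only [decide_eq_decide]
        omega
      rw [heq]
      exact ih (a + 1) b (by omega)

-- downward scan: first hit of the descending range = max of the in-range column values
theorem pv_down (x y : Int) (all_cubes : List (List Int)) (zs : List Int)
    (hz : ∀ t : Int, t ∈ zs ↔ [x, y, t] ∈ all_cubes) :
    ∀ (n : ℕ) (a b : Int), (a - b).toNat = n →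
    pvFirstHit x y all_cubes (PySem.List.pyRange a b (-1)) =
      PySem.List.max? (zs.filter (fun t => decide (b < t ∧ t ≤ a))) (fun t => t) := by
  intro n
  induction n with
  | zero =>
    intro a b hn
    have hab : a ≤ b := by omega
    rw [PySem.List.pyRange_neg_one_eq_nil hab]
    have : zs.filter (fun t => decide (b < t ∧ t ≤ a)) = [] := by
      apply List.filter_eq_nil_iff.mpr
      intro t _; simp; omega
    rw [this]
    simp [pvFirstHit, PySem.List.max?]
  | succ m ih =>
    intro a b hn
    have hba : b < a := by omega
    rw [PySem.List.pyRange_neg_one_cons hba]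
    simp only [pvFirstHit]
    by_cases hmem : [x, y, a] ∈ all_cubes
    · rw [if_pos hmem]
      have ha : a ∈ zs.filter (fun t => decide (b < t ∧ t ≤ a)) := by
        rw [List.mem_filter]
        exact ⟨(hz a).2 hmem, by simp; omega⟩
      have hne : zs.filter (fun t => decide (b < t ∧ t ≤ a)) ≠ [] := by
        intro h; rw [h] at ha; cases ha
      cases hm' : PySem.List.max? (zs.filter (fun t => decide (b < t ∧ t ≤ a))) (fun t => t) with
      | none => exact absurd ((PySem.List.max?_eq_none_iff _ _).mp hm') hne
      | some m' => ?_
      have hmax := PySem.List.max?_isMax hm' a ha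
      have hmem' := PySem.List.max?_mem hm'
      rw [List.mem_filter] at hmem'
      have : m' ≤ a := by have := hmem'.2; simp at this; omega
      congr 1; omega
    · rw [if_neg hmem]
      have heq : zs.filter (fun t => decide (b < t ∧ t ≤ a)) =
          zs.filter (fun t => decide (b < t ∧ t ≤ a - 1)) := by
        apply List.filter_congr
        intro t ht
        have hta : t ≠ a := by rintro rfl; exact hmem ((hz t).1 ht)
        simp only [decide_eq_decide]
        omega
      rw [heq]
      exact ih (a - 1) b (by omega)

-- ===== VERDICT (by name: the statement is the Claim_ definition above) =====
theorem check_z_spec : Claim_equal_check_z := by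
  intro cube all_cubes min_z max_z _ hpre
  unfold Pre_check_z at hpre
  unfold Spec_check_z check_z check_z_alt
  match cube, hpre with
  | x :: y :: z :: rest, _ =>
    have g0 : PySem.List.pyGet? (x :: y :: z :: rest) 0 = some x := by
      simp only [PySem.List.pyGet?, PySem.List.pyIdx?]
      norm_num
      rw [if_pos (show (0:Int) ≤ (rest.length:Int) + 1 + 1 by positivity)]
      simp
    have g1 : PySem.List.pyGet? (x :: y :: z :: rest) 1 = some y := by
      simp only [PySem.List.pyGet?, PySem.List.pyIdx?]
      norm_num
      rw [if_pos (show (0:Int) ≤ (rest.length:Int) + 1 by positivity)]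
      simp
    have g2 : PySem.List.pyGet? (x :: y :: z :: rest) 2 = some z := by
      simp only [PySem.List.pyGet?, PySem.List.pyIdx?]
      norm_num
      rw [if_pos (show (2:Int) ≤ (rest.length:Int) + 1 + 1 by omega)]
      simp
    rw [g0, g1, g2]
    simp only
    set zs : List Int := all_cubes.filterMap (fun c =>
      match c with
      | [a, b, t] => if a = x ∧ b = y then some t else none
      | _ => none) with hzs
    have hz : ∀ t : Int, t ∈ zs ↔ [x, y, t] ∈ all_cubes := fun t => pv_mem_zs x y t all_cubes
    have h1 := pv_up x y all_cubes zs hz (max_z + 1 - z).toNat z (max_z + 1) rfl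
    have h2 := pv_down x y all_cubes zs hz (z - (min_z - 1)).toNat z (min_z - 1) rfl
    have e1 : zs.filter (fun t => decide (z ≤ t ∧ t < max_z + 1)) =
        zs.filter (fun t => decide (z ≤ t ∧ t ≤ max_z)) := by
      apply List.filter_congr; intro t _
      simp only [decide_eq_decide]; omega
    have e2 : zs.filter (fun t => decide (min_z - 1 < t ∧ t ≤ z)) =
        zs.filter (fun t => decide (min_z ≤ t ∧ t ≤ z)) := by
      apply List.filter_congr; intro t _
      simp only [decide_eq_decide]; omega
    rw [e1] at h1
    rw [e2] at h2
    rw [h1, h2]
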